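-- pv_equiv track=rewrite | github.com/PapaBear1981/SupplyLine-MRO-Suite | backend/fix_flake8_final.py | fix_blank_lines_between_defs
-- ===== SOURCE A (Python) =====
-- def fix_blank_lines_between_defs(content):
--     """Fix E302/E305: Add 2 blank lines before top-level function/class definitions"""
--     lines = content.split("\n")
--     fixed_lines = []
--     i = 0
--
--     while i < len(lines):
--         line = lines[i]
--         stripped = line.strip()
--
--         # Check if this is a top-level function or class definition
--         if (stripped.startswith(("def ", "class "))) and not line.startswith(" "):
--             # Count preceding blank lines
--             blank_count = 0
--             j = i - 1
--             while j >= 0 and not lines[j].strip():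
--                 blank_count += 1
--                 j -= 1
--
--             # Check if previous non-blank line is a decorator
--             is_after_decorator = j >= 0 and lines[j].strip().startswith("@")
--
--             # Need 2 blank lines before top-level def/class (unless after decorator or at start)
--             if j >= 0 and not is_after_decorator and blank_count < 2:
--                 # Add missing blank lines
--                 for _ in range(2 - blank_count):
--                     fixed_lines.append("")
--
--         fixed_lines.append(line)
--         i += 1
--
--     return "\n".join(fixed_lines)
-- ===== SOURCE B (Python) =====
-- def fix_blank_lines_between_defs(content):
--     """Fix E302/E305: single forward pass with running blank counter and last non-blank line."""
--     fixed_lines = []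
--     blank_count = 0
--     last_nonblank = None
--     for line in content.split("\n"):
--         stripped = line.strip()
--         if stripped.startswith(("def ", "class ")) and not line.startswith(" "):
--             if last_nonblank is not None and not last_nonblank.startswith("@") and blank_count < 2:
--                 fixed_lines.extend([""] * (2 - blank_count))
--         fixed_lines.append(line)
--         if stripped:
--             blank_count = 0
--             last_nonblank = stripped
--         else:
--             blank_count += 1
--     return "\n".join(fixed_lines)
-- ===== Notes on version B (the rewrite author's own statement) =====
-- stated objective: faster
-- what changed: Replaced A's inner backward while-scan over preceding lines (re-counting blanks and re-finding the previous non-blank line at every def/class) with a single forward pass that maintains a running blank counter and the last non-blank stripped line.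
import Mathlib
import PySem

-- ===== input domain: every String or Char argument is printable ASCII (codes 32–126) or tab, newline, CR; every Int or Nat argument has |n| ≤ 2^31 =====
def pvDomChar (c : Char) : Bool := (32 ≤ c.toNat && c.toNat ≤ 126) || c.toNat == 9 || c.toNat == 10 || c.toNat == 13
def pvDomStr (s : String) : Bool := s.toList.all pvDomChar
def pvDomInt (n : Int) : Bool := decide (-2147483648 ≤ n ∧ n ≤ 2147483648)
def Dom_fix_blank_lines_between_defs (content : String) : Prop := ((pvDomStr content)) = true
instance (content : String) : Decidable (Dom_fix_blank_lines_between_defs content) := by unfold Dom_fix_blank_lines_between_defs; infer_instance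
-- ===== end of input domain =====

-- B replaces A's inner backward scan over preceding lines with a single forward pass
-- carrying a running blank-line counter and the last non-blank stripped line (return value only; neither mutates its input).

-- ===== PORT A =====
-- A's inner `while j >= 0 and not lines[j].strip()` walks backwards from i-1; `prev` holds
-- lines[0..i-1] in reverse, so that walk is a scan from the head of `prev`.
-- Returns (blank_count, j) where j = the line A's index stops on (none = j reached -1).
def pvABack (prev : List String) : Nat × Option String :=
  match prev with
  | [] => (0, none)
  | l :: rest =>
    if PySem.Str.strip l == "" then
      let r := pvABack rest
      (r.1 + 1, r.2)
    else (0, some l)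

def pvALoop (rest : List String) (prev : List String) (acc : List String) : List String :=
  match rest with
  | [] => acc.reverse
  | line :: rest' =>
    let stripped := PySem.Str.strip line
    let acc' :=
      if (PySem.Str.startswith stripped "def " || PySem.Str.startswith stripped "class ")
          && !PySem.Str.startswith line " " then
        let bj := pvABack prev
        let is_after_decorator :=
          match bj.2 with
          | some l => PySem.Str.startswith (PySem.Str.strip l) "@"
          | none => false
        if bj.2.isSome && !is_after_decorator && bj.1 < 2 then
          List.replicate (2 - bj.1) "" ++ acc
        else acc
      else acc
    pvALoop rest' (line :: prev) (line :: acc')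

def fix_blank_lines_between_defs (content : String) : String :=
  PySem.Str.join "\n" (pvALoop (((PySem.Str.split? content "\n").getD [])) [] [])

-- ===== PORT B =====
def pvBLoop (rest : List String) (blank_count : Nat) (last_nonblank : Option String)
    (acc : List String) : List String :=
  match rest with
  | [] => acc.reverse
  | line :: rest' =>
    let stripped := PySem.Str.strip line
    let acc' :=
      if (PySem.Str.startswith stripped "def " || PySem.Str.startswith stripped "class ")
          && !PySem.Str.startswith line " " then
        if last_nonblank.isSome
            && !(match last_nonblank with
                 | some s => PySem.Str.startswith s "@"
                 | none => false)
            && blank_count < 2 then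
          List.replicate (2 - blank_count) "" ++ acc
        else acc
      else acc
    if stripped == "" then pvBLoop rest' (blank_count + 1) last_nonblank (line :: acc')
    else pvBLoop rest' 0 (some stripped) (line :: acc')

def fix_blank_lines_between_defs_alt (content : String) : String :=
  PySem.Str.join "\n" (pvBLoop (((PySem.Str.split? content "\n").getD [])) 0 none [])

-- ===== PRECONDITION & SPEC =====
def Spec_fix_blank_lines_between_defs (content : String) (out : String) : Prop := out = fix_blank_lines_between_defs_alt content
instance (content : String) (out : String) : Decidable (Spec_fix_blank_lines_between_defs content out) := by unfold Spec_fix_blank_lines_between_defs; infer_instance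

-- ===== CLAIM (what is proved, stated in full; the proofs are below) =====
def Claim_equal_fix_blank_lines_between_defs : Prop := ∀ (content : String), Dom_fix_blank_lines_between_defs content → Spec_fix_blank_lines_between_defs content (fix_blank_lines_between_defs content)

-- ===== LEMMAS AND PROOFS =====

-- B's running state coincides with A's backward scan over the processed prefix.
theorem pvLoop_eq (rest : List String) : ∀ (prev acc : List String),
    pvALoop rest prev acc
      = pvBLoop rest (pvABack prev).1 ((pvABack prev).2.map PySem.Str.strip) acc := by
  induction rest with
  | nil => intro prev acc; rfl
  | cons line rest' ih =>
    intro prev acc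
    simp only [pvALoop, pvBLoop]
    have hdec : (match ((pvABack prev).2.map PySem.Str.strip) with
        | some s => PySem.Str.startswith s "@" | none => false)
      = (match (pvABack prev).2 with
        | some l => PySem.Str.startswith (PySem.Str.strip l) "@" | none => false) := by
      cases (pvABack prev).2 <;> rfl
    have hsome : ((pvABack prev).2.map PySem.Str.strip).isSome = (pvABack prev).2.isSome := by
      cases (pvABack prev).2 <;> rfl
    rw [hdec, hsome]
    by_cases hb : PySem.Str.strip line == ""
    · have hback : pvABack (line :: prev)
          = ((pvABack prev).1 + 1, (pvABack prev).2) := by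
        simp [pvABack, hb]
      rw [ih (line :: prev), hback]
      simp [hb]
    · have hback : pvABack (line :: prev) = (0, some line) := by
        simp [pvABack, hb]
      rw [ih (line :: prev), hback]
      simp [hb]

-- ===== VERDICT (by name: the statement is the Claim_ definition above) =====
theorem fix_blank_lines_between_defs_spec : Claim_equal_fix_blank_lines_between_defs := by
  intro content _
  show _ = _
  unfold fix_blank_lines_between_defs fix_blank_lines_between_defs_alt
  rw [pvLoop_eq]
  rfl
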